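-- pv_equiv track=rewrite | github.com/ABDude123/fastflag-manager | models/fastflag_database.py | _matches_game_category
-- ===== SOURCE A (Python) =====
-- from typing import Dict, List, Optional, Any
--
-- def _matches_game_category(game_name: str, recommended_games: List[str]) -> bool:
--     """Check if game matches a category in recommended games"""
--     game_categories = {
--         "FPS Games": ["Arsenal", "Phantom Forces", "Bad Business"],
--         "RPG Games": ["Adopt Me", "Blox Fruits", "Pet Simulator"],
--         "Fighting Games": ["Blox Fruits", "Your Bizarre Adventure", "ABA"]
--     }
--
--     for category in recommended_games:
--         if category in game_categories and game_name in game_categories[category]: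
--             return True
--     return False
-- ===== SOURCE B (Python) =====
-- def _matches_game_category(game_name, recommended_games):
--     """Check if game matches a category in recommended games"""
--     game_categories = {
--         "FPS Games": ["Arsenal", "Phantom Forces", "Bad Business"],
--         "RPG Games": ["Adopt Me", "Blox Fruits", "Pet Simulator"],
--         "Fighting Games": ["Blox Fruits", "Your Bizarre Adventure", "ABA"]
--     }
--     # inverted index: game -> set of categories that list it
--     index = {}
--     for category, games in game_categories.items():
--         for g in games:
--             index[g] = index.get(g, set()) | {category}
--     return bool(index.get(game_name, set()) & set(recommended_games))
-- ===== Notes on version B (the rewrite author's own statement) =====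
-- stated objective: alternative
-- what changed: Replaces A's scan over recommended categories (each doing a dict lookup plus a membership test in that category's game list) by a precomputed inverted index mapping each game to the set of categories listing it, answering the query as one set intersection with set(recommended_games).
import Mathlib
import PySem

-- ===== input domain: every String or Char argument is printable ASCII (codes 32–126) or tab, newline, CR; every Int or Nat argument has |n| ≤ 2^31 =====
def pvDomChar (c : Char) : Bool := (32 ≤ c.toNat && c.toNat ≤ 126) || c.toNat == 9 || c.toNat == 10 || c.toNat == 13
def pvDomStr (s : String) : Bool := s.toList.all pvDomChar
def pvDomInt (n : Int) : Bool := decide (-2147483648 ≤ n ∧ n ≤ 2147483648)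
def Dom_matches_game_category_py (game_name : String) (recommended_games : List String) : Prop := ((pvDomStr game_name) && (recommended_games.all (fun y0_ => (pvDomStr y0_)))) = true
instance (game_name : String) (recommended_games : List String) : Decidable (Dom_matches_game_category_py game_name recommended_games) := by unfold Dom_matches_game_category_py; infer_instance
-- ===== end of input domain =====

-- B replaces A's scan over recommended categories (dict lookup + membership test per category)
-- by a precomputed inverted index game → set of categories, answering with one set intersection
-- against set(recommended_games); objective: alternative decomposition, same cost.

-- ===== PORT A =====
-- the fixed literal table of A (B's source carries the same literal)
def pvGameCategories : PySem.Dict String (List String) :=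
  PySem.Dict.ofList
    [ ("FPS Games", ["Arsenal", "Phantom Forces", "Bad Business"]),
      ("RPG Games", ["Adopt Me", "Blox Fruits", "Pet Simulator"]),
      ("Fighting Games", ["Blox Fruits", "Your Bizarre Adventure", "ABA"]) ]

-- A's loop with early return: 'for category in recommended_games: if category in table and game_name in table[category]: return True'
def pvALoop (game_name : String) : List String → Bool
  | [] => false
  | category :: rest =>
      if pvGameCategories.contains category
          && (pvGameCategories.getD category []).contains game_name then true
      else pvALoop game_name rest

def matches_game_category_py (game_name : String) (recommended_games : List String) : Bool :=
  pvALoop game_name recommended_games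

-- ===== PORT B =====
-- B's inverted index build: for category, games in table.items(): for g in games: index[g] = index.get(g, set()) | {category}
def pvIndex : PySem.Dict String (PySem.Set String) :=
  pvGameCategories.items.foldl
    (fun idx cg =>
      cg.2.foldl
        (fun idx g =>
          idx.insert g (PySem.Set.union (idx.getD g PySem.Set.empty)
                          (PySem.Set.add PySem.Set.empty cg.1)))
        idx)
    PySem.Dict.empty

def matches_game_category_py_alt (game_name : String) (recommended_games : List String) : Bool :=
  -- bool(index.get(game_name, set()) & set(recommended_games))
  !(PySem.Set.inter (pvIndex.getD game_name PySem.Set.empty)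
      (PySem.Set.ofList recommended_games)).isEmpty

-- ===== PRECONDITION & SPEC =====
def Spec_matches_game_category_py (game_name : String) (recommended_games : List String) (out : Bool) : Prop := out = matches_game_category_py_alt game_name recommended_games
instance (game_name : String) (recommended_games : List String) (out : Bool) : Decidable (Spec_matches_game_category_py game_name recommended_games out) := by unfold Spec_matches_game_category_py; infer_instance

-- ===== CLAIM (what is proved, stated in full; the proofs are below) =====
def Claim_equal_matches_game_category_py : Prop := ∀ (game_name : String) (recommended_games : List String), Dom_matches_game_category_py game_name recommended_games → Spec_matches_game_category_py game_name recommended_games (matches_game_category_py game_name recommended_games)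

-- ===== LEMMAS AND PROOFS =====

-- the key bridge: A's per-category check agrees with membership in B's inverted-index entry
theorem pv_check_eq (category game_name : String) :
    (pvGameCategories.contains category
      && (pvGameCategories.getD category []).contains game_name)
      = (pvIndex.getD game_name PySem.Set.empty).contains category := by
  by_cases h0 : game_name = "Arsenal"
  · subst h0
    by_cases c0 : category = "FPS Games"
    · subst c0; decide
    ·
      by_cases c1 : category = "RPG Games"
      · subst c1; decide
      ·
        by_cases c2 : category = "Fighting Games"
        · subst c2; decide
        ·
          simp [pvGameCategories, pvIndex, PySem.Dict.contains, PySem.Dict.getD, PySem.Dict.get?, PySem.Dict.ofList, PySem.Dict.update, PySem.Dict.insert, PySem.Dict.empty, List.find?, PySem.Set.union, PySem.Set.add, PySem.Set.empty, c0, Ne.symm c0, Ne.symm c1, Ne.symm c2]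
  ·
    by_cases h1 : game_name = "Phantom Forces"
    · subst h1
      by_cases c0 : category = "FPS Games"
      · subst c0; decide
      ·
        by_cases c1 : category = "RPG Games"
        · subst c1; decide
        ·
          by_cases c2 : category = "Fighting Games"
          · subst c2; decide
          ·
            simp [pvGameCategories, pvIndex, PySem.Dict.contains, PySem.Dict.getD, PySem.Dict.get?, PySem.Dict.ofList, PySem.Dict.update, PySem.Dict.insert, PySem.Dict.empty, List.find?, PySem.Set.union, PySem.Set.add, PySem.Set.empty, c0, Ne.symm c0, Ne.symm c1, Ne.symm c2]
    ·
      by_cases h2 : game_name = "Bad Business"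
      · subst h2
        by_cases c0 : category = "FPS Games"
        · subst c0; decide
        ·
          by_cases c1 : category = "RPG Games"
          · subst c1; decide
          ·
            by_cases c2 : category = "Fighting Games"
            · subst c2; decide
            ·
              simp [pvGameCategories, pvIndex, PySem.Dict.contains, PySem.Dict.getD, PySem.Dict.get?, PySem.Dict.ofList, PySem.Dict.update, PySem.Dict.insert, PySem.Dict.empty, List.find?, PySem.Set.union, PySem.Set.add, PySem.Set.empty, c0, Ne.symm c0, Ne.symm c1, Ne.symm c2]
      ·
        by_cases h3 : game_name = "Adopt Me"
        · subst h3
          by_cases c0 : category = "FPS Games"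
          · subst c0; decide
          ·
            by_cases c1 : category = "RPG Games"
            · subst c1; decide
            ·
              by_cases c2 : category = "Fighting Games"
              · subst c2; decide
              ·
                simp [pvGameCategories, pvIndex, PySem.Dict.contains, PySem.Dict.getD, PySem.Dict.get?, PySem.Dict.ofList, PySem.Dict.update, PySem.Dict.insert, PySem.Dict.empty, List.find?, PySem.Set.union, PySem.Set.add, PySem.Set.empty, Ne.symm c0, c1, Ne.symm c1, Ne.symm c2]
        ·
          by_cases h4 : game_name = "Blox Fruits"
          · subst h4
            by_cases c0 : category = "FPS Games"
            · subst c0; decide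
            ·
              by_cases c1 : category = "RPG Games"
              · subst c1; decide
              ·
                by_cases c2 : category = "Fighting Games"
                · subst c2; decide
                ·
                  simp [pvGameCategories, pvIndex, PySem.Dict.contains, PySem.Dict.getD, PySem.Dict.get?, PySem.Dict.ofList, PySem.Dict.update, PySem.Dict.insert, PySem.Dict.empty, List.find?, PySem.Set.union, PySem.Set.add, PySem.Set.empty, Ne.symm c0, c1, Ne.symm c1, c2, Ne.symm c2, Ne.symm h0, Ne.symm h1, Ne.symm h2, Ne.symm h3]
          ·
            by_cases h5 : game_name = "Pet Simulator"
            · subst h5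
              by_cases c0 : category = "FPS Games"
              · subst c0; decide
              ·
                by_cases c1 : category = "RPG Games"
                · subst c1; decide
                ·
                  by_cases c2 : category = "Fighting Games"
                  · subst c2; decide
                  ·
                    simp [pvGameCategories, pvIndex, PySem.Dict.contains, PySem.Dict.getD, PySem.Dict.get?, PySem.Dict.ofList, PySem.Dict.update, PySem.Dict.insert, PySem.Dict.empty, List.find?, PySem.Set.union, PySem.Set.add, PySem.Set.empty, Ne.symm c0, c1, Ne.symm c1, Ne.symm c2, h4]
            ·
              by_cases h6 : game_name = "Your Bizarre Adventure"
              · subst h6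
                by_cases c0 : category = "FPS Games"
                · subst c0; decide
                ·
                  by_cases c1 : category = "RPG Games"
                  · subst c1; decide
                  ·
                    by_cases c2 : category = "Fighting Games"
                    · subst c2; decide
                    ·
                      simp [pvGameCategories, pvIndex, PySem.Dict.contains, PySem.Dict.getD, PySem.Dict.get?, PySem.Dict.ofList, PySem.Dict.update, PySem.Dict.insert, PySem.Dict.empty, List.find?, PySem.Set.union, PySem.Set.add, PySem.Set.empty, Ne.symm c0, Ne.symm c1, c2, Ne.symm c2]
              ·
                by_cases h7 : game_name = "ABA"
                · subst h7
                  by_cases c0 : category = "FPS Games"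
                  · subst c0; decide
                  ·
                    by_cases c1 : category = "RPG Games"
                    · subst c1; decide
                    ·
                      by_cases c2 : category = "Fighting Games"
                      · subst c2; decide
                      ·
                        simp [pvGameCategories, pvIndex, PySem.Dict.contains, PySem.Dict.getD, PySem.Dict.get?, PySem.Dict.ofList, PySem.Dict.update, PySem.Dict.insert, PySem.Dict.empty, List.find?, PySem.Set.union, PySem.Set.add, PySem.Set.empty, Ne.symm c0, Ne.symm c1, c2, Ne.symm c2]
                ·
                  have hnone : List.find? (fun p => p.1 == game_name) pvIndex.items = none := by
                    rw [List.find?_eq_none]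
                    intro x hx
                    have hI : pvIndex.items = [("Arsenal", ["FPS Games"]), ("Phantom Forces", ["FPS Games"]), ("Bad Business", ["FPS Games"]), ("Adopt Me", ["RPG Games"]), ("Blox Fruits", ["RPG Games", "Fighting Games"]), ("Pet Simulator", ["RPG Games"]), ("Your Bizarre Adventure", ["Fighting Games"]), ("ABA", ["Fighting Games"])] := rfl
                    rw [hI] at hx
                    fin_cases hx <;> simp [Ne.symm h0, Ne.symm h1, Ne.symm h2, Ne.symm h3, Ne.symm h4, Ne.symm h5, Ne.symm h6, Ne.symm h7]
                  by_cases c0 : category = "FPS Games"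
                  · subst c0; simp [pvGameCategories, PySem.Dict.contains, PySem.Dict.getD, PySem.Dict.get?, PySem.Dict.ofList, PySem.Dict.update, PySem.Dict.insert, PySem.Dict.empty, hnone, h0, h1, h2]
                  ·
                    by_cases c1 : category = "RPG Games"
                    · subst c1; simp [pvGameCategories, PySem.Dict.contains, PySem.Dict.getD, PySem.Dict.get?, PySem.Dict.ofList, PySem.Dict.update, PySem.Dict.insert, PySem.Dict.empty, hnone, h3, h4, h5]
                    ·
                      by_cases c2 : category = "Fighting Games"
                      · subst c2; simp [pvGameCategories, PySem.Dict.contains, PySem.Dict.getD, PySem.Dict.get?, PySem.Dict.ofList, PySem.Dict.update, PySem.Dict.insert, PySem.Dict.empty, hnone, h4, h6, h7]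
                      ·
                        simp [pvGameCategories, PySem.Dict.contains, PySem.Dict.getD, PySem.Dict.get?, PySem.Dict.ofList, PySem.Dict.update, PySem.Dict.insert, PySem.Dict.empty, hnone, Ne.symm c0, Ne.symm c1, Ne.symm c2]


-- A's early-return loop is List.any of the per-category check, rewritten through pv_check_eq
set_option maxRecDepth 4096 in
theorem pv_aLoop_any (game_name : String) (rg : List String) :
    pvALoop game_name rg
      = rg.any (fun c => (pvIndex.getD game_name PySem.Set.empty).contains c) := by
  induction rg with
  | nil => rfl
  | cons c rest ih =>
      simp only [pvALoop, pv_check_eq, ih, List.any_cons]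
      generalize (pvIndex.getD game_name PySem.Set.empty).contains c = b
      cases b <;> simp

-- ===== VERDICT (by name: the statement is the Claim_ definition above) =====
set_option maxRecDepth 4096 in
theorem matches_game_category_py_spec : Claim_equal_matches_game_category_py := by
  intro game_name rg _
  unfold Spec_matches_game_category_py matches_game_category_py matches_game_category_py_alt
  rw [pv_aLoop_any]
  generalize pvIndex.getD game_name PySem.Set.empty = cats
  rw [Bool.eq_iff_iff, Bool.not_eq_true']
  simp only [List.any_eq_true, List.isEmpty_eq_false_iff_exists_mem, PySem.Set.inter,
    List.mem_filter]
  constructor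
  · rintro ⟨c, hc, hmem⟩
    exact ⟨c, by simpa using hmem, by simpa [PySem.Set.mem_ofList] using hc⟩
  · rintro ⟨c, hmem, hc⟩
    exact ⟨c, by simpa [PySem.Set.mem_ofList] using hc, by simpa using hmem⟩
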